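-- pv_equiv track=rewrite | github.com/dcowern/whispyrkeep | backend/apps/characters/services/validation.py | _get_max_spell_level
-- ===== SOURCE A (Python) =====
-- FULL_CASTER_SPELL_SLOTS = {
--     1: {1: 2},
--     2: {1: 3},
--     3: {1: 4, 2: 2},
--     4: {1: 4, 2: 3},
--     5: {1: 4, 2: 3, 3: 2},
--     6: {1: 4, 2: 3, 3: 3},
--     7: {1: 4, 2: 3, 3: 3, 4: 1},
--     8: {1: 4, 2: 3, 3: 3, 4: 2},
--     9: {1: 4, 2: 3, 3: 3, 4: 3, 5: 1},
--     10: {1: 4, 2: 3, 3: 3, 4: 3, 5: 2},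
--     11: {1: 4, 2: 3, 3: 3, 4: 3, 5: 2, 6: 1},
--     12: {1: 4, 2: 3, 3: 3, 4: 3, 5: 2, 6: 1},
--     13: {1: 4, 2: 3, 3: 3, 4: 3, 5: 2, 6: 1, 7: 1},
--     14: {1: 4, 2: 3, 3: 3, 4: 3, 5: 2, 6: 1, 7: 1},
--     15: {1: 4, 2: 3, 3: 3, 4: 3, 5: 2, 6: 1, 7: 1, 8: 1},
--     16: {1: 4, 2: 3, 3: 3, 4: 3, 5: 2, 6: 1, 7: 1, 8: 1},
--     17: {1: 4, 2: 3, 3: 3, 4: 3, 5: 2, 6: 1, 7: 1, 8: 1, 9: 1},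
--     18: {1: 4, 2: 3, 3: 3, 4: 3, 5: 3, 6: 1, 7: 1, 8: 1, 9: 1},
--     19: {1: 4, 2: 3, 3: 3, 4: 3, 5: 3, 6: 2, 7: 1, 8: 1, 9: 1},
--     20: {1: 4, 2: 3, 3: 3, 4: 3, 5: 3, 6: 2, 7: 2, 8: 1, 9: 1},
-- }
--
-- FULL_CASTER_CLASSES = ["Bard", "Cleric", "Druid", "Sorcerer", "Wizard"]
--
-- HALF_CASTER_CLASSES = ["Paladin", "Ranger"]
--
-- def _get_max_spell_level(class_name: str, level: int) -> int:
--     """Get the maximum spell level available for a class at a given level."""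
--     if class_name in FULL_CASTER_CLASSES:
--         slots = FULL_CASTER_SPELL_SLOTS.get(level, {})
--         if slots:
--             return max(int(k) for k in slots)
--         return 0
--     elif class_name in HALF_CASTER_CLASSES:
--         # Half casters get spells at level 2
--         if level < 2:
--             return 0
--         # Approximate: half casters progress at half rate
--         effective_level = (level + 1) // 2
--         slots = FULL_CASTER_SPELL_SLOTS.get(effective_level, {})
--         if slots:
--             return max(int(k) for k in slots)
--         return 0
--     # Other classes (Fighter, Rogue subclasses) - varies
--     return 4  # Default to max 4th level spells
-- ===== SOURCE B (Python) =====
-- FULL_CASTER_CLASSES = ["Bard", "Cleric", "Druid", "Sorcerer", "Wizard"]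
-- HALF_CASTER_CLASSES = ["Paladin", "Ranger"]
--
--
-- def _max_from_level(L):
--     """Closed form of the max key of FULL_CASTER_SPELL_SLOTS[L] (0 outside 1..20)."""
--     return min(9, (L + 1) // 2) if 1 <= L <= 20 else 0
--
--
-- def _get_max_spell_level(class_name: str, level: int) -> int:
--     if class_name in FULL_CASTER_CLASSES:
--         return _max_from_level(level)
--     if class_name in HALF_CASTER_CLASSES:
--         return 0 if level < 2 else _max_from_level((level + 1) // 2)
--     return 4
-- ===== Notes on version B (the rewrite author's own statement) =====
-- stated objective: simpler
-- what changed: Replaces the 20-row spell-slot table lookup plus max-over-keys scan with the closed-form arithmetic min(9,(L+1)//2) on 1..20 (0 outside), keeping the full/half/default branch structure.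
import Mathlib
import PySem

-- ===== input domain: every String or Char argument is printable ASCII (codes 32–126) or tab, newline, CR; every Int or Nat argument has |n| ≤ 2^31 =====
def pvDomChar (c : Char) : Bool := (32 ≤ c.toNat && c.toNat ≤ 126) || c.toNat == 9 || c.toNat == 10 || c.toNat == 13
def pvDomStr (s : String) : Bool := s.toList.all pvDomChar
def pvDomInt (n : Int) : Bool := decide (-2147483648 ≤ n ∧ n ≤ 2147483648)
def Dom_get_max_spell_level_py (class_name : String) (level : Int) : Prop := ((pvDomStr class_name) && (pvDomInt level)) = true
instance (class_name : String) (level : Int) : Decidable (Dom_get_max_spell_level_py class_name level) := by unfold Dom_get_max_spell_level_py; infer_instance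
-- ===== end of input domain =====

-- B replaces A's slot-table lookup + max-over-keys with a closed-form arithmetic helper (simpler).

-- ===== PORT A =====
def pvFullCasterSpellSlots : PySem.Dict Int (PySem.Dict Int Int) := PySem.Dict.mk [
  (1,  PySem.Dict.mk [(1,2)]),
  (2,  PySem.Dict.mk [(1,3)]),
  (3,  PySem.Dict.mk [(1,4),(2,2)]),
  (4,  PySem.Dict.mk [(1,4),(2,3)]),
  (5,  PySem.Dict.mk [(1,4),(2,3),(3,2)]),
  (6,  PySem.Dict.mk [(1,4),(2,3),(3,3)]),
  (7,  PySem.Dict.mk [(1,4),(2,3),(3,3),(4,1)]),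
  (8,  PySem.Dict.mk [(1,4),(2,3),(3,3),(4,2)]),
  (9,  PySem.Dict.mk [(1,4),(2,3),(3,3),(4,3),(5,1)]),
  (10, PySem.Dict.mk [(1,4),(2,3),(3,3),(4,3),(5,2)]),
  (11, PySem.Dict.mk [(1,4),(2,3),(3,3),(4,3),(5,2),(6,1)]),
  (12, PySem.Dict.mk [(1,4),(2,3),(3,3),(4,3),(5,2),(6,1)]),
  (13, PySem.Dict.mk [(1,4),(2,3),(3,3),(4,3),(5,2),(6,1),(7,1)]),
  (14, PySem.Dict.mk [(1,4),(2,3),(3,3),(4,3),(5,2),(6,1),(7,1)]),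
  (15, PySem.Dict.mk [(1,4),(2,3),(3,3),(4,3),(5,2),(6,1),(7,1),(8,1)]),
  (16, PySem.Dict.mk [(1,4),(2,3),(3,3),(4,3),(5,2),(6,1),(7,1),(8,1)]),
  (17, PySem.Dict.mk [(1,4),(2,3),(3,3),(4,3),(5,2),(6,1),(7,1),(8,1),(9,1)]),
  (18, PySem.Dict.mk [(1,4),(2,3),(3,3),(4,3),(5,3),(6,1),(7,1),(8,1),(9,1)]),
  (19, PySem.Dict.mk [(1,4),(2,3),(3,3),(4,3),(5,3),(6,2),(7,1),(8,1),(9,1)]),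
  (20, PySem.Dict.mk [(1,4),(2,3),(3,3),(4,3),(5,3),(6,2),(7,2),(8,1),(9,1)])]

def pvFullCasterClasses : List String := ["Bard", "Cleric", "Druid", "Sorcerer", "Wizard"]
def pvHalfCasterClasses : List String := ["Paladin", "Ranger"]

-- `if slots: return max(int(k) for k in slots); return 0` — max over the dict's keys, 0 if empty
def pvMaxKey (slots : PySem.Dict Int Int) : Int :=
  if slots.size ≠ 0 then
    match PySem.List.max? slots.keys (fun k => k) with
    | some m => m
    | none => 0
  else 0

def get_max_spell_level_py (class_name : String) (level : Int) : Int :=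
  if class_name ∈ pvFullCasterClasses then
    pvMaxKey (pvFullCasterSpellSlots.getD level PySem.Dict.empty)
  else if class_name ∈ pvHalfCasterClasses then
    if level < 2 then 0
    else
      pvMaxKey (pvFullCasterSpellSlots.getD (PySem.Int.floordiv (level + 1) 2) PySem.Dict.empty)
  else 4

-- ===== PORT B =====
def pvMaxFromLevel (L : Int) : Int :=
  if 1 ≤ L ∧ L ≤ 20 then min 9 (PySem.Int.floordiv (L + 1) 2) else 0

def get_max_spell_level_py_alt (class_name : String) (level : Int) : Int :=
  if class_name ∈ pvFullCasterClasses then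
    pvMaxFromLevel level
  else if class_name ∈ pvHalfCasterClasses then
    if level < 2 then 0 else pvMaxFromLevel (PySem.Int.floordiv (level + 1) 2)
  else 4

-- ===== PRECONDITION & SPEC =====
def Spec_get_max_spell_level_py (class_name : String) (level : Int) (out : Int) : Prop := out = get_max_spell_level_py_alt class_name level
instance (class_name : String) (level : Int) (out : Int) : Decidable (Spec_get_max_spell_level_py class_name level out) := by unfold Spec_get_max_spell_level_py; infer_instance

-- ===== CLAIM (what is proved, stated in full; the proofs are below) =====
def Claim_equal_get_max_spell_level_py : Prop := ∀ (class_name : String) (level : Int), Dom_get_max_spell_level_py class_name level → Spec_get_max_spell_level_py class_name level (get_max_spell_level_py class_name level)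

-- ===== LEMMAS AND PROOFS =====

-- outside 1..20 the table has no entry
theorem pvTable_get?_none (L : Int) (h : ¬ (1 ≤ L ∧ L ≤ 20)) :
    pvFullCasterSpellSlots.get? L = none := by
  have h1 : ((1:Int) == L) = false := by rw [beq_eq_false_iff_ne]; omega
  have h2 : ((2:Int) == L) = false := by rw [beq_eq_false_iff_ne]; omega
  have h3 : ((3:Int) == L) = false := by rw [beq_eq_false_iff_ne]; omega
  have h4 : ((4:Int) == L) = false := by rw [beq_eq_false_iff_ne]; omega
  have h5 : ((5:Int) == L) = false := by rw [beq_eq_false_iff_ne]; omega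
  have h6 : ((6:Int) == L) = false := by rw [beq_eq_false_iff_ne]; omega
  have h7 : ((7:Int) == L) = false := by rw [beq_eq_false_iff_ne]; omega
  have h8 : ((8:Int) == L) = false := by rw [beq_eq_false_iff_ne]; omega
  have h9 : ((9:Int) == L) = false := by rw [beq_eq_false_iff_ne]; omega
  have h10 : ((10:Int) == L) = false := by rw [beq_eq_false_iff_ne]; omega
  have h11 : ((11:Int) == L) = false := by rw [beq_eq_false_iff_ne]; omega
  have h12 : ((12:Int) == L) = false := by rw [beq_eq_false_iff_ne]; omega
  have h13 : ((13:Int) == L) = false := by rw [beq_eq_false_iff_ne]; omega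
  have h14 : ((14:Int) == L) = false := by rw [beq_eq_false_iff_ne]; omega
  have h15 : ((15:Int) == L) = false := by rw [beq_eq_false_iff_ne]; omega
  have h16 : ((16:Int) == L) = false := by rw [beq_eq_false_iff_ne]; omega
  have h17 : ((17:Int) == L) = false := by rw [beq_eq_false_iff_ne]; omega
  have h18 : ((18:Int) == L) = false := by rw [beq_eq_false_iff_ne]; omega
  have h19 : ((19:Int) == L) = false := by rw [beq_eq_false_iff_ne]; omega
  have h20 : ((20:Int) == L) = false := by rw [beq_eq_false_iff_ne]; omega
  simp only [pvFullCasterSpellSlots, PySem.Dict.get?_mk_cons,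
    h1, h2, h3, h4, h5, h6, h7, h8, h9, h10, h11, h12, h13, h14, h15, h16, h17, h18, h19, h20,
    if_false, Bool.false_eq_true]
  rfl

-- the table lookup + max-over-keys agrees with the closed form everywhere
theorem pvTable_eq_closed (L : Int) :
    pvMaxKey (pvFullCasterSpellSlots.getD L PySem.Dict.empty) = pvMaxFromLevel L := by
  by_cases h : 1 ≤ L ∧ L ≤ 20
  · obtain ⟨h1, h2⟩ := h
    interval_cases L <;> decide
  · rw [PySem.Dict.getD_eq_get?_getD, pvTable_get?_none L h]
    simp [pvMaxKey, pvMaxFromLevel, h, PySem.Dict.size, PySem.Dict.empty]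

-- ===== VERDICT (by name: the statement is the Claim_ definition above) =====
theorem get_max_spell_level_py_spec : Claim_equal_get_max_spell_level_py := by
  intro class_name level _
  unfold Spec_get_max_spell_level_py get_max_spell_level_py get_max_spell_level_py_alt
  simp only [pvTable_eq_closed]
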